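-- pv_equiv track=rewrite | github.com/liupengsay/PyIsTheBestLang | src/basis/implemention/template.py | get_spiral_matrix_loc
-- ===== SOURCE A (Python) =====
-- from typing import List
--
-- def get_spiral_matrix_loc(m, n, num) -> List[int]:
--     """clockwise spiral pos of num start from 1"""
--     assert 1 <= num <= m * n
--
--     def check(x):
--         res = 2 * x * (m - x + 1) + 2 * x * (n - x + 1) - 4 * x
--         return res < num
--
--     low = 0
--     high = max(m // 2, n // 2)
--     while low < high - 1:
--         mid = low + (high - low) // 2
--         if check(mid):
--             low = mid
--         else:
--             high = mid
--     rem = high if check(high) else low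
--
--     num -= 2 * rem * (m - rem + 1) + 2 * rem * (n - rem + 1) - 4 * rem
--     assert num > 0
--     m -= 2 * rem
--     n -= 2 * rem
--     r = c = rem
--
--     if num <= n:
--         a = 1
--         b = num
--     elif n < num <= n + m - 1:
--         a = num - n + 1
--         b = n
--     elif n + (m - 1) < num <= n + (m - 1) + (n - 1):
--         a = m
--         b = n - (num - n - (m - 1))
--     else:
--         a = m - (num - n - (n - 1) - (m - 1))
--         b = 1
--     return [r + a, c + b]
-- ===== SOURCE B (Python) =====
-- from typing import List
--
-- def get_spiral_matrix_loc(m, n, num) -> List[int]: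
--     """clockwise spiral pos of num start from 1: peel full frames iteratively"""
--     assert 1 <= num <= m * n
--     r = c = 0
--     M, N = m, n
--     while M > 1 and N > 1:
--         per = 2 * M + 2 * N - 4
--         if num <= per:
--             break
--         num -= per
--         M -= 2
--         N -= 2
--         r += 1
--         c += 1
--     if num <= N:
--         a, b = 1, num
--     elif num <= N + M - 1:
--         a, b = num - N + 1, N
--     elif num <= N + (M - 1) + (N - 1):
--         a, b = M, N - (num - N - (M - 1))
--     else:
--         a, b = M - (num - N - (N - 1) - (M - 1)), 1
--     return [r + a, c + b]
-- ===== Notes on version B (the rewrite author's own statement) =====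
-- stated objective: simpler
-- what changed: Replaces the binary search over the cumulative frame-cell-count formula by a direct loop that peels one spiral frame per iteration, subtracting its perimeter from num until num falls inside the current frame.
-- outside the precondition, e.g. on get_spiral_matrix_loc(-3, -3, 9): A returns [-1, -1], B returns [-23, 1]
import Mathlib
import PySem

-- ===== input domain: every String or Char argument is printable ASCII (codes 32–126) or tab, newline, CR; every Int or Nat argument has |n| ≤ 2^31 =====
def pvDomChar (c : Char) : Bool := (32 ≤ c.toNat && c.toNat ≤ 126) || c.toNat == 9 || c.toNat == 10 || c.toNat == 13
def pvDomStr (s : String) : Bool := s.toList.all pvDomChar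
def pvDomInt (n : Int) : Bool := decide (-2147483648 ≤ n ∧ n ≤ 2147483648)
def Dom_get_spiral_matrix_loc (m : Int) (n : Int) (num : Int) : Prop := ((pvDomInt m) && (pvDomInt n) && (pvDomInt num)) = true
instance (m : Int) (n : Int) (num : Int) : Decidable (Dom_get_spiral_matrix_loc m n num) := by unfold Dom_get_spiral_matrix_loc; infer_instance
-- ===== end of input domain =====

-- B replaces A's binary search over the cumulative frame-size formula by a loop that
-- peels one spiral frame per iteration (objective: simpler).

-- ===== PORT A =====
-- A's inner helper `check(x)` body: 2*x*(m-x+1) + 2*x*(n-x+1) - 4*x  (cells of the first x frames)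
def pvCells (m n x : Int) : Int := 2*x*(m-x+1) + 2*x*(n-x+1) - 4*x

-- A's `while low < high - 1` binary search, folded together with the final
-- `rem = high if check(high) else low` selection
def pvBS (m n num low high : Int) : Int :=
  if low < high - 1 then
    let mid := low + PySem.Int.floordiv (high - low) 2
    if pvCells m n mid < num then pvBS m n num mid high else pvBS m n num low mid
  else
    if pvCells m n high < num then high else low
termination_by (high - low).toNat
decreasing_by
  · have h2 : (2:Int) ≤ high - low := by omega
    have := PySem.Int.floordiv_eq_ediv_of_pos (a := high - low) (b := 2) (by omega)
    omega
  · have h2 : (2:Int) ≤ high - low := by omega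
    have := PySem.Int.floordiv_eq_ediv_of_pos (a := high - low) (b := 2) (by omega)
    omega

def get_spiral_matrix_loc (m : Int) (n : Int) (num : Int) : List Int :=
  -- `assert 1 <= num <= m * n` raises outside Pre_; the port returns [] there
  if 1 ≤ num ∧ num ≤ m * n then
    let high := max (PySem.Int.floordiv m 2) (PySem.Int.floordiv n 2)
    let rem := pvBS m n num 0 high
    let num1 := num - (2*rem*(m - rem + 1) + 2*rem*(n - rem + 1) - 4*rem)
    -- `assert num > 0`
    if 0 < num1 then
      let m1 := m - 2*rem
      let n1 := n - 2*rem
      let r := rem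
      let c := rem
      if num1 ≤ n1 then [r + 1, c + num1]
      else if n1 < num1 ∧ num1 ≤ n1 + m1 - 1 then [r + (num1 - n1 + 1), c + n1]
      else if n1 + (m1-1) < num1 ∧ num1 ≤ n1 + (m1-1) + (n1-1) then
        [r + m1, c + (n1 - (num1 - n1 - (m1-1)))]
      else [r + (m1 - (num1 - n1 - (n1-1) - (m1-1))), c + 1]
    else []
  else []

-- ===== PORT B =====
-- B's frame-peeling loop: state (M, N, num, r, c)
def pvPeel (M N num r c : Int) : Int × Int × Int × Int × Int :=
  if 1 < M ∧ 1 < N then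
    let per := 2*M + 2*N - 4
    if num ≤ per then (M, N, num, r, c)
    else pvPeel (M - 2) (N - 2) (num - per) (r + 1) (c + 1)
  else (M, N, num, r, c)
termination_by M.toNat

def get_spiral_matrix_loc_alt (m : Int) (n : Int) (num : Int) : List Int :=
  -- `assert 1 <= num <= m * n` raises outside Pre_; the port returns [] there
  if 1 ≤ num ∧ num ≤ m * n then
    let s := pvPeel m n num 0 0
    let M := s.1
    let N := s.2.1
    let num1 := s.2.2.1
    let r := s.2.2.2.1
    let c := s.2.2.2.2
    if num1 ≤ N then [r + 1, c + num1]
    else if num1 ≤ N + M - 1 then [r + (num1 - N + 1), c + N]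
    else if num1 ≤ N + (M-1) + (N-1) then [r + M, c + (N - (num1 - N - (M-1)))]
    else [r + (M - (num1 - N - (N-1) - (M-1))), c + 1]
  else []

-- ===== PRECONDITION & SPEC =====
-- Pre_ excludes the degenerate inputs with equal negative odd dimensions and num = m*n
-- (A's assert happens to accept them since m*n > 0): the spiral is meaningless there and
-- A's accidentally negative ring index and B's zero-frame fallthrough return different
-- arbitrary values, neither of which anyone would specify.
def Pre_get_spiral_matrix_loc (m : Int) (n : Int) (num : Int) : Prop :=
  (1 ≤ num ∧ num ≤ m * n) ∧ ¬(m = n ∧ m < 0 ∧ num = m * n ∧ m % 2 ≠ 0)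
instance (m : Int) (n : Int) (num : Int) : Decidable (Pre_get_spiral_matrix_loc m n num) := by
  unfold Pre_get_spiral_matrix_loc; infer_instance

def pvWitness_get_spiral_matrix_loc : Int × Int × Int := (3, 4, 7)

def Spec_get_spiral_matrix_loc (m : Int) (n : Int) (num : Int) (out : List Int) : Prop :=
  out = get_spiral_matrix_loc_alt m n num
instance (m : Int) (n : Int) (num : Int) (out : List Int) : Decidable (Spec_get_spiral_matrix_loc m n num out) := by
  unfold Spec_get_spiral_matrix_loc; infer_instance

-- ===== CLAIM (what is proved, stated in full; the proofs are below) =====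
def Claim_equal_get_spiral_matrix_loc : Prop := ∀ (m : Int) (n : Int) (num : Int), Dom_get_spiral_matrix_loc m n num → Pre_get_spiral_matrix_loc m n num → Spec_get_spiral_matrix_loc m n num (get_spiral_matrix_loc m n num)

-- ===== LEMMAS AND PROOFS =====

-- invariant of A's binary search: it lands on a rem with cells(rem) < num and
-- (num ≤ cells(rem+1) or rem is the top of the search range)
theorem pvBS_inv (m n num K : Int) :
    ∀ d : ℕ, ∀ low high : Int, (high - low).toNat = d →
      0 ≤ low → low ≤ high → high ≤ K →
      pvCells m n low < num → (high = K ∨ ¬ pvCells m n high < num) →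
      0 ≤ pvBS m n num low high ∧ pvBS m n num low high ≤ K ∧
      pvCells m n (pvBS m n num low high) < num ∧
      (num ≤ pvCells m n (pvBS m n num low high + 1) ∨ pvBS m n num low high = K) := by
  intro d
  induction d using Nat.strong_induction_on with
  | _ d ih =>
    intro low high hd h0 hlh hhK hlow hhigh
    rw [pvBS]
    by_cases hg : low < high - 1
    · simp only [hg, if_true]
      have h2 : (2:Int) ≤ high - low := by omega
      have hfd := PySem.Int.floordiv_eq_ediv_of_pos (a := high - low) (b := 2) (by omega)
      set mid := low + PySem.Int.floordiv (high - low) 2 with hmid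
      have hml : low < mid := by omega
      have hmh : mid < high := by omega
      by_cases hc : pvCells m n mid < num
      · rw [if_pos hc]
        exact ih (high - mid).toNat (by omega) mid high rfl (by omega) (by omega) hhK hc hhigh
      · rw [if_neg hc]
        exact ih (mid - low).toNat (by omega) low mid rfl h0 (by omega) (by omega) hlow (Or.inr hc)
    · simp only [hg, if_false]
      by_cases hc : pvCells m n high < num
      · rw [if_pos hc]
        refine ⟨by omega, hhK, hc, Or.inr ?_⟩
        rcases hhigh with h | h
        · exact h
        · exact absurd hc h
      · rw [if_neg hc]
        have hle : low = high ∨ high = low + 1 := by omega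
        refine ⟨h0, by omega, hlow, ?_⟩
        rcases hle with h | h
        · exact absurd (h ▸ hlow) hc
        · exact Or.inl (by rw [h] at hc; omega)

-- B's peeling loop, run from an intermediate state j, stops exactly at t
theorem pvPeel_run (m n num t : Int) (ht0 : 0 ≤ t)
    (hcont : ∀ i : Int, 0 ≤ i → i < t →
      1 < m - 2*i ∧ 1 < n - 2*i ∧ 2*(m - 2*i) + 2*(n - 2*i) - 4 < num - pvCells m n i)
    (hstop : (m - 2*t ≤ 1 ∨ n - 2*t ≤ 1) ∨
      num - pvCells m n t ≤ 2*(m - 2*t) + 2*(n - 2*t) - 4) :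
    ∀ k : ℕ, ∀ j : Int, 0 ≤ j → j ≤ t → (t - j).toNat = k →
      pvPeel (m - 2*j) (n - 2*j) (num - pvCells m n j) j j
        = (m - 2*t, n - 2*t, num - pvCells m n t, t, t) := by
  intro k
  induction k with
  | zero =>
    intro j hj0 hjt hk
    have hjt' : j = t := by omega
    subst hjt'
    rw [pvPeel]
    by_cases hg : 1 < m - 2*j ∧ 1 < n - 2*j
    · rw [if_pos hg]
      have hle : num - pvCells m n j ≤ 2*(m - 2*j) + 2*(n - 2*j) - 4 := by
        rcases hstop with h | h
        · omega
        · exact h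
      rw [if_pos hle]
    · rw [if_neg hg]
  | succ k ih =>
    intro j hj0 hjt hk
    have hjt' : j < t := by omega
    obtain ⟨hm, hn, hlt⟩ := hcont j hj0 hjt'
    rw [pvPeel]
    have hg : 1 < m - 2*j ∧ 1 < n - 2*j := ⟨hm, hn⟩
    rw [if_pos hg]
    have hnle : ¬ num - pvCells m n j ≤ 2*(m - 2*j) + 2*(n - 2*j) - 4 := by omega
    rw [if_neg hnle]
    have e1 : m - 2*j - 2 = m - 2*(j+1) := by ring
    have e2 : n - 2*j - 2 = n - 2*(j+1) := by ring
    have e3 : num - pvCells m n j - (2*(m - 2*j) + 2*(n - 2*j) - 4)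
        = num - pvCells m n (j+1) := by unfold pvCells; ring
    rw [e1, e2, e3]
    exact ih (j+1) (by omega) (by omega) (by omega)

-- key quadratic fact: for min ≤ s ≤ max (as a product bound), s*(m+n-s) ≥ m*n
theorem cells_ge_mn (m n s : Int) (h1 : (s - m) * (s - n) ≤ 0) :
    m * n ≤ s * (m + n - s) := by nlinarith [h1]

-- negative dimensions: cells(K) ≥ num at the top index, for m the smaller side
theorem neg_key (m n num l : Int) (hm : m ≤ -1) (hn : n ≤ -1) (hml : m ≤ 2*l + 1)
    (hnl : n = 2*l ∨ n = 2*l + 1) (h1 : 1 ≤ num) (h2 : num ≤ m * n)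
    (hexcl : ¬(m = n ∧ m < 0 ∧ num = m * n ∧ m % 2 ≠ 0)) :
    num ≤ pvCells m n l := by
  have hc : pvCells m n l = 2*l*(m + n - 2*l) := by unfold pvCells; ring
  rcases hnl with h | h
  · -- n even: cells l = n*m
    have : pvCells m n l = m * n := by rw [hc]; subst h; ring
    omega
  · -- n odd: cells l = (n-1)*(m+1) = m*n + n - m - 1
    have hceq : pvCells m n l = m*n + n - m - 1 := by rw [hc]; subst h; ring
    by_cases hmn : m = n
    · have hodd : m % 2 ≠ 0 := by omega
      have hne : num ≠ m * n := fun he => hexcl ⟨hmn, by omega, he, hodd⟩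
      omega
    · have : m ≤ n - 1 := by omega
      omega

-- equality of the two final four-case frame computations
theorem four_eq (M N num1 r : Int) :
    (if num1 ≤ N then [r + 1, r + num1]
     else if N < num1 ∧ num1 ≤ N + M - 1 then [r + (num1 - N + 1), r + N]
     else if N + (M-1) < num1 ∧ num1 ≤ N + (M-1) + (N-1) then
       [r + M, r + (N - (num1 - N - (M-1)))]
     else [r + (M - (num1 - N - (N-1) - (M-1))), r + 1])
    = (if num1 ≤ N then [r + 1, r + num1]
       else if num1 ≤ N + M - 1 then [r + (num1 - N + 1), r + N]
       else if num1 ≤ N + (M-1) + (N-1) then [r + M, r + (N - (num1 - N - (M-1)))]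
       else [r + (M - (num1 - N - (N-1) - (M-1))), r + 1]) := by
  split_ifs <;> first | rfl | omega

theorem cells_zero (m n : Int) : pvCells m n 0 = 0 := by unfold pvCells; ring

-- ===== VERDICT (by name: the statement is the Claim_ definition above) =====
theorem get_spiral_matrix_loc_spec : Claim_equal_get_spiral_matrix_loc := by
  intro m n num _ hpre
  obtain ⟨⟨h1, h2⟩, hexcl⟩ := hpre
  unfold Spec_get_spiral_matrix_loc get_spiral_matrix_loc get_spiral_matrix_loc_alt
  have hguard : 1 ≤ num ∧ num ≤ m * n := ⟨h1, h2⟩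
  simp only [hguard, and_self, if_true]
  have hpos : (0:Int) < m * n := by omega
  set K := max (PySem.Int.floordiv m 2) (PySem.Int.floordiv n 2) with hK
  have hkm := PySem.Int.floordiv_mul_add_mod m 2
  have hkn := PySem.Int.floordiv_mul_add_mod n 2
  have hmodm : PySem.Int.mod m 2 = 0 ∨ PySem.Int.mod m 2 = 1 := by
    have := PySem.Int.mod_eq_emod_of_pos (a := m) (b := 2) (by omega); omega
  have hmodn : PySem.Int.mod n 2 = 0 ∨ PySem.Int.mod n 2 = 1 := by
    have := PySem.Int.mod_eq_emod_of_pos (a := n) (b := 2) (by omega); omega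
  rcases mul_pos_iff.mp hpos with ⟨hm, hn⟩ | ⟨hm, hn⟩
  · -- m ≥ 1, n ≥ 1 : binary search = peel count
    have hK0 : 0 ≤ K := by
      have : 0 ≤ PySem.Int.floordiv m 2 := by omega
      omega
    have h2K : 2*K ≤ max m n := by
      rcases max_cases (PySem.Int.floordiv m 2) (PySem.Int.floordiv n 2) with ⟨he, _⟩ | ⟨he, _⟩ <;>
        rw [hK, he] <;> omega
    have hrem := pvBS_inv m n num K (K - 0).toNat 0 K rfl le_rfl hK0 le_rfl
      (by rw [cells_zero]; omega) (Or.inl rfl)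
    set rem := pvBS m n num 0 K with hremdef
    obtain ⟨hr0, hrK, hrlt, hrstop⟩ := hrem
    -- 2*rem ≤ min m n
    have h2rem : 2*rem ≤ min m n := by
      by_contra hcon
      push_neg at hcon
      have hs1 : min m n < 2*rem := hcon
      have hs2 : 2*rem ≤ max m n := by omega
      have hfac : (2*rem - m) * (2*rem - n) ≤ 0 := by
        rcases le_total m n with h | h
        · exact mul_nonpos_of_nonneg_of_nonpos (by omega) (by omega)
        · rw [mul_comm]; exact mul_nonpos_of_nonneg_of_nonpos (by omega) (by omega)
      have hge := cells_ge_mn m n (2*rem) hfac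
      have hexp : pvCells m n rem = (2*rem) * (m + n - 2*rem) := by unfold pvCells; ring
      omega
    -- continuation condition for i < rem
    have hcont : ∀ i : Int, 0 ≤ i → i < rem →
        1 < m - 2*i ∧ 1 < n - 2*i ∧ 2*(m - 2*i) + 2*(n - 2*i) - 4 < num - pvCells m n i := by
      intro i hi0 hir
      refine ⟨by omega, by omega, ?_⟩
      -- num > cells(i+1) since cells(i+1) ≤ cells(rem) < num on the increasing part
      have hmono : pvCells m n (i+1) ≤ pvCells m n rem := by
        have hfac : 0 ≤ (2*rem - (2*i+2)) * (m + n - (2*i+2) - 2*rem) :=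
          mul_nonneg (by omega) (by omega)
        have hexp : pvCells m n rem - pvCells m n (i+1)
            = (2*rem - (2*i+2)) * (m + n - (2*i+2) - 2*rem) := by unfold pvCells; ring
        omega
      have hident : pvCells m n (i+1) = pvCells m n i + (2*(m - 2*i) + 2*(n - 2*i) - 4) := by
        unfold pvCells; ring
      omega
    -- stop condition at rem
    have hstop : (m - 2*rem ≤ 1 ∨ n - 2*rem ≤ 1) ∨
        num - pvCells m n rem ≤ 2*(m - 2*rem) + 2*(n - 2*rem) - 4 := by
      rcases hrstop with h | h
      · right
        have hident : pvCells m n (rem+1) = pvCells m n rem + (2*(m - 2*rem) + 2*(n - 2*rem) - 4) := by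
          unfold pvCells; ring
        omega
      · left
        rw [h, hK]
        rcases max_cases (PySem.Int.floordiv m 2) (PySem.Int.floordiv n 2) with ⟨he, hge⟩ | ⟨he, hge⟩ <;>
          rw [he] <;> omega
    have hpeel := pvPeel_run m n num rem hr0 hcont hstop (rem - 0).toNat 0 le_rfl hr0 rfl
    have e0 : m - 2*0 = m := by ring
    have e0' : n - 2*0 = n := by ring
    have e0'' : num - pvCells m n 0 = num := by rw [cells_zero]; ring
    rw [e0, e0', e0''] at hpeel
    rw [hpeel]
    have hnum1 : num - (2*rem*(m - rem + 1) + 2*rem*(n - rem + 1) - 4*rem)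
        = num - pvCells m n rem := by unfold pvCells; ring
    rw [hnum1]
    have hngt : 0 < num - pvCells m n rem := by omega
    simp only [hngt, if_true]
    exact four_eq (m - 2*rem) (n - 2*rem) (num - pvCells m n rem) rem
  · -- m ≤ -1, n ≤ -1 : both sides skip their loops (rem = 0)
    have hKneg : K ≤ -1 := by
      have : PySem.Int.floordiv m 2 ≤ -1 := by omega
      have : PySem.Int.floordiv n 2 ≤ -1 := by omega
      rcases max_cases (PySem.Int.floordiv m 2) (PySem.Int.floordiv n 2) with ⟨he, _⟩ | ⟨he, _⟩ <;>
        rw [hK, he] <;> omega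
    -- cells(K) ≥ num, using the Pre_ exclusion
    have hcK : ¬ pvCells m n K < num := by
      push_neg
      have hexcl' : ¬(m = n ∧ m < 0 ∧ num = m * n ∧ m % 2 ≠ 0) := hexcl
      rcases max_cases (PySem.Int.floordiv m 2) (PySem.Int.floordiv n 2) with ⟨he, hge⟩ | ⟨he, hge⟩
      · -- K = ⌊m/2⌋ : n is the smaller side; use symmetry of pvCells
        have hsym : pvCells m n (PySem.Int.floordiv m 2) = pvCells n m (PySem.Int.floordiv m 2) := by
          unfold pvCells; ring
        rw [hK, he, hsym]
        have hexcl'' : ¬(n = m ∧ n < 0 ∧ num = n * m ∧ n % 2 ≠ 0) := by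
          intro ⟨ha, hb, hc, hd⟩
          exact hexcl' ⟨ha.symm, by omega, by rw [hc]; ring, by omega⟩
        exact neg_key n m num (PySem.Int.floordiv m 2) (by omega) (by omega) (by omega)
          (by omega) h1 (by rw [mul_comm]; exact h2) hexcl''
      · rw [hK, he]
        exact neg_key m n num (PySem.Int.floordiv n 2) (by omega) (by omega) (by omega)
          (by omega) h1 h2 hexcl'
    have hbs : pvBS m n num 0 K = 0 := by
      rw [pvBS]
      have hg : ¬ (0 : Int) < K - 1 := by omega
      simp only [hg, if_false, hcK, if_false]
    rw [hbs]
    have hpeel : pvPeel m n num 0 0 = (m, n, num, 0, 0) := by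
      rw [pvPeel]
      have : ¬ (1 < m ∧ 1 < n) := by omega
      simp only [this, if_false]
    rw [hpeel]
    have hnum1 : num - (2*0*(m - 0 + 1) + 2*0*(n - 0 + 1) - 4*0) = num := by ring
    rw [hnum1]
    simp only [show (0:Int) < num from by omega, if_true]
    rw [show m - 2*(0:Int) = m from by ring, show n - 2*(0:Int) = n from by ring]
    exact four_eq m n num 0
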